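-- pv_equiv track=rewrite | github.com/sadchordoma/pt_start_int16_test_task | 1/func_title.py | enhanced_title
-- ===== SOURCE A (Python) =====
-- from string import punctuation
--
-- not_letters = " 0123456789" + punctuation
--
-- def enhanced_title(input: str) -> str:
--     s = list(input)
--     index = None
--     for i in range(len(s)):
--         if s[i] in not_letters:
--             if index is not None:
--                 s[index] = s[index].upper()
--                 index = None
--         else:
--             if index is None:
--                 index = i
--     if index is not None:
--         s[index] = s[index].upper()
--     return "".join(s)
-- ===== SOURCE B (Python) =====
-- from string import punctuation
--
-- not_letters = " 0123456789" + punctuation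
--
-- def enhanced_title(input: str) -> str:
--     # One forward pass: uppercase a char exactly when it is a "letter"
--     # (not in not_letters) and the previous char was not a letter.
--     out = []
--     prev = False
--     for c in input:
--         letter = c not in not_letters
--         out.append(c.upper() if letter and not prev else c)
--         prev = letter
--     return "".join(out)
-- ===== Notes on version B (the rewrite author's own statement) =====
-- stated objective: simpler
-- what changed: Replaced A's index-remembering scan that mutates the list at each run end with a single stateless-output forward pass keeping only a previous-char-was-letter flag and uppercasing each run's first letter as it is emitted.
import Mathlib
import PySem

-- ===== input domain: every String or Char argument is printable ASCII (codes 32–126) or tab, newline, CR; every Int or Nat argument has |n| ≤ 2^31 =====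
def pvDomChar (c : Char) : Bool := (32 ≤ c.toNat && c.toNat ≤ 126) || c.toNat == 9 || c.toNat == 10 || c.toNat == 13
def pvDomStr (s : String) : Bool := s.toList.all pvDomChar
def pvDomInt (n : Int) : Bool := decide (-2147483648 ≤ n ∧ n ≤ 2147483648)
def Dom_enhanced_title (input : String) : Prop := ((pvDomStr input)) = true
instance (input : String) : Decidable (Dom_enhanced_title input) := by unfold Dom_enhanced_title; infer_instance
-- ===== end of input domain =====

-- B replaces A's index-remembering, list-mutating scan with a single forward pass
-- keeping a previous-char-was-letter flag (objective: simpler).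

-- not_letters = " 0123456789" + string.punctuation
def pvNotLetters : List Char := " 0123456789!\"#$%&'()*+,-./:;<=>?@[\\]^_`{|}~".toList

-- `c in not_letters` for a single character c
def pvIsNot (c : Char) : Bool := pvNotLetters.contains c

-- ===== PORT A =====
-- one iteration of A's `for i in range(len(s))` body over the state (s, index);
-- s[i] is read with getD (exact: every index fed by the loop is in range)
def pvStepA (st : List Char × Option Nat) (i : Nat) : List Char × Option Nat :=
  if pvIsNot (st.1.getD i ' ') then
    match st.2 with
    | some j => (st.1.set j (PySem.Chars.upperChar (st.1.getD j ' ')), none)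
    | none => (st.1, none)
  else
    match st.2 with
    | some _ => (st.1, st.2)
    | none => (st.1, some i)

-- the trailing `if index is not None: s[index] = s[index].upper()` then `"".join(s)`
def pvFinishA (st : List Char × Option Nat) : List Char :=
  match st.2 with
  | some j => st.1.set j (PySem.Chars.upperChar (st.1.getD j ' '))
  | none => st.1

def enhanced_title (input : String) : String :=
  let s := input.toList
  String.mk (pvFinishA ((List.range s.length).foldl pvStepA (s, none)))

-- ===== PORT B =====
-- Source B's loop: emit each char (uppercased iff it starts a letter run), carrying prev
def pvAltGo (prev : Bool) : List Char → List Char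
  | [] => []
  | c :: t => (if !pvIsNot c && !prev then PySem.Chars.upperChar c else c) :: pvAltGo (!pvIsNot c) t

def enhanced_title_alt (input : String) : String :=
  String.mk (pvAltGo false input.toList)

-- ===== PRECONDITION & SPEC =====
def Spec_enhanced_title (input : String) (out : String) : Prop := out = enhanced_title_alt input
instance (input : String) (out : String) : Decidable (Spec_enhanced_title input out) := by unfold Spec_enhanced_title; infer_instance

-- ===== CLAIM (what is proved, stated in full; the proofs are below) =====
def Claim_equal_enhanced_title : Prop := ∀ (input : String), Dom_enhanced_title input → Spec_enhanced_title input (enhanced_title input)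

-- ===== LEMMAS AND PROOFS =====

lemma pvGetD_mid (p : List Char) (d : Char) (t : List Char) (x : Char) :
    (p ++ d :: t).getD p.length x = d := by
  induction p with
  | nil => rfl
  | cons a p ih => simpa using ih

lemma pvSet_mid (p : List Char) (c x : Char) (q : List Char) :
    (p ++ c :: q).set p.length x = p ++ x :: q := by
  induction p with
  | nil => rfl
  | cons a p ih => simpa using ih

-- Loop invariant: after processing a prefix, A's state is either (out ++ rest, none)
-- with out already equal to B's output on the processed prefix, or
-- ((out ++ c :: run) ++ rest, some out.length) with the pending run start c still
-- lowercase; in both cases finishing the loop and the trailing fix-up yields B's output.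
lemma pvLoop : ∀ (t p : List Char),
    (pvFinishA ((List.range' p.length t.length 1).foldl pvStepA (p ++ t, none))
        = p ++ pvAltGo false t)
    ∧ ∀ (c : Char) (q : List Char),
        pvFinishA ((List.range' (p ++ c :: q).length t.length 1).foldl pvStepA
            ((p ++ c :: q) ++ t, some p.length))
          = p ++ PySem.Chars.upperChar c :: (q ++ pvAltGo true t) := by
  intro t
  induction t with
  | nil =>
    intro p
    refine ⟨by simp [pvFinishA, pvAltGo], ?_⟩
    intro c q
    simp [pvFinishA, pvSet_mid, pvGetD_mid, pvAltGo]
  | cons d t' ih =>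
    intro p
    constructor
    · -- state (p ++ d :: t', none), current index p.length
      simp only [List.length_cons]
      rw [List.range'_succ, List.foldl_cons]
      by_cases h : pvIsNot d = true
      · have : pvStepA (p ++ d :: t', none) p.length = (p ++ d :: t', none) := by
          simp [pvStepA, pvGetD_mid, h]
        rw [this]
        have ha := (ih (p ++ [d])).1
        simp only [List.length_append, List.length_cons, List.length_nil] at ha ⊢
        simpa [pvAltGo, h, List.append_assoc] using ha
      · have : pvStepA (p ++ d :: t', none) p.length = (p ++ d :: t', some p.length) := by
          simp [pvStepA, pvGetD_mid, h]
        rw [this]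
        have hb := (ih p).2 d []
        simp only [List.length_append, List.length_cons, List.length_nil] at hb ⊢
        simpa [pvAltGo, h, List.append_assoc] using hb
    · intro c q
      -- state ((p ++ c :: q) ++ d :: t', some p.length), current index (p ++ c :: q).length
      simp only [List.length_cons]
      rw [List.range'_succ, List.foldl_cons]
      by_cases h : pvIsNot d = true
      · have : pvStepA ((p ++ c :: q) ++ d :: t', some p.length)
              (p ++ c :: q).length
            = (p ++ PySem.Chars.upperChar c :: (q ++ d :: t'), none) := by
          simp [pvStepA, pvGetD_mid, h, List.append_assoc, pvSet_mid]
        rw [this]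
        have ha := (ih (p ++ PySem.Chars.upperChar c :: (q ++ [d]))).1
        simp only [List.length_append, List.length_cons, List.length_nil] at ha ⊢
        rw [show p.length + (q.length + 1 + 1) = p.length + (q.length + 1) + 1 by omega] at ha
        simpa [pvAltGo, h, List.append_assoc] using ha
      · have : pvStepA ((p ++ c :: q) ++ d :: t', some p.length)
              (p ++ c :: q).length
            = ((p ++ c :: q) ++ d :: t', some p.length) := by
          simp [pvStepA, pvGetD_mid, h]
        rw [this]
        have hb := (ih p).2 c (q ++ [d])
        simp only [List.length_append, List.length_cons, List.length_nil] at hb ⊢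
        rw [show p.length + (q.length + 1 + 1) = p.length + (q.length + 1) + 1 by omega] at hb
        simpa [pvAltGo, h, List.append_assoc] using hb

-- ===== VERDICT (by name: the statement is the Claim_ definition above) =====
theorem enhanced_title_spec : Claim_equal_enhanced_title := by
  intro input _
  show enhanced_title input = enhanced_title_alt input
  have h := (pvLoop input.toList []).1
  simp only [List.length_nil, List.nil_append] at h
  simp only [enhanced_title, enhanced_title_alt, List.range_eq_range']
  rw [h]
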